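-- pv_equiv track=rewrite | github.com/Ipekyurttas/AI-Powered-Object-Detection-Image-Captioning-Web-App | captioning/caption_generator.py | generate_simple_caption
-- ===== SOURCE A (Python) =====
-- def generate_simple_caption(boxes, confs, class_ids, classes):
--     """Detected objects se simple caption banata hai"""
--     if not boxes:
--         return "No objects detected in the image"
--
--     objects_count = {}
--     for class_id in class_ids:
--         obj_name = classes[class_id]
--         objects_count[obj_name] = objects_count.get(obj_name, 0) + 1
--
--     # Simple caption generate karo
--     caption_parts = []
--     for obj, count in objects_count.items():
--         if count == 1:
--             caption_parts.append(f"a {obj}")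
--         else:
--             caption_parts.append(f"{count} {obj}s")
--
--     return "Image contains " + ", ".join(caption_parts)
-- ===== SOURCE B (Python) =====
-- def generate_simple_caption(boxes, confs, class_ids, classes):
--     """Detected objects se simple caption banata hai"""
--     if not boxes:
--         return "No objects detected in the image"
--
--     # Remove-and-conquer: repeatedly take the first remaining name, filter out
--     # all of its occurrences, and read its count off the length drop.
--     names = [classes[cid] for cid in class_ids]
--     parts = []
--     while names:
--         head = names[0]
--         rest = [n for n in names[1:] if n != head]
--         c = len(names) - len(rest)
--         parts.append(f"a {head}" if c == 1 else f"{c} {head}s")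
--         names = rest
--     return "Image contains " + ", ".join(parts)
-- ===== Notes on version B (the rewrite author's own statement) =====
-- stated objective: alternative
-- what changed: Replaces A's incremental count-dictionary plus items pass with a remove-and-conquer loop: repeatedly take the first remaining name, filter out all its occurrences, and obtain its count as the length drop, so no counting container or per-name count scan exists at all.
import Mathlib
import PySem

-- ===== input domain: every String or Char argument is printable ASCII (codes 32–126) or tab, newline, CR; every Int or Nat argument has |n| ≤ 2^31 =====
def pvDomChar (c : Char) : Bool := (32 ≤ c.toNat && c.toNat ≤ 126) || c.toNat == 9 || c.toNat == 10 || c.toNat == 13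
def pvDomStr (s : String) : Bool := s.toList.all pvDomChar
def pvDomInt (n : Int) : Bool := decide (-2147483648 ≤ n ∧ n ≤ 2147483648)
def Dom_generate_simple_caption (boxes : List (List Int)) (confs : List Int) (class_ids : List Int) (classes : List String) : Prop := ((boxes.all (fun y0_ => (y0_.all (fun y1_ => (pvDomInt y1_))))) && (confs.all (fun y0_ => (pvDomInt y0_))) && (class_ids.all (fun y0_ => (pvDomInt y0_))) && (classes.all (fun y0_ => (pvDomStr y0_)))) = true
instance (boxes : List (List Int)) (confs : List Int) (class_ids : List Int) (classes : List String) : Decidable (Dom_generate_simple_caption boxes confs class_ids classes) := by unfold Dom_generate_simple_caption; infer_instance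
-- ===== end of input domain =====

-- B replaces A's count-dictionary with a remove-and-conquer loop (take first name, filter out its occurrences, count = length drop): an alternative decomposition, same result.

-- ===== PORT A =====
def generate_simple_caption (boxes : List (List Int)) (confs : List Int) (class_ids : List Int) (classes : List String) : String :=
  if boxes.isEmpty then "No objects detected in the image"
  else
    let objects_count : PySem.Dict String Int :=
      class_ids.foldl (fun d class_id =>
        let obj_name := PySem.List.pyGetD classes class_id ""   -- classes[class_id]; total form, exact under Pre_
        d.insert obj_name (d.getD obj_name 0 + 1)) PySem.Dict.empty
    let caption_parts : List String :=
      objects_count.items.foldl (fun acc p =>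
        acc ++ [if p.2 = 1 then "a " ++ p.1 else PySem.Int.toStr p.2 ++ " " ++ p.1 ++ "s"]) []
    "Image contains " ++ PySem.Str.join ", " caption_parts

-- ===== PORT B =====
-- the 'while names:' loop of Source B: head, filter, count-by-length-drop
def pvPartsB (names : List String) : List String :=
  if hne : names = [] then []
  else
    let h := names.head hne
    let rest := names.tail.filter (fun n => n ≠ h)
    let c : Int := (names.length : Int) - rest.length
    (if c = 1 then "a " ++ h else PySem.Int.toStr c ++ " " ++ h ++ "s") :: pvPartsB rest
termination_by names.length
decreasing_by
  show (names.tail.filter (fun n => n ≠ names.head hne)).length < names.length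
  have h1 : (names.tail.filter (fun n => n ≠ names.head hne)).length ≤ names.tail.length :=
    List.length_filter_le _ _
  have h2 : names.length ≠ 0 := fun h0 => hne (List.eq_nil_of_length_eq_zero h0)
  have h3 : names.tail.length = names.length - 1 := List.length_tail
  omega

def generate_simple_caption_alt (boxes : List (List Int)) (confs : List Int) (class_ids : List Int) (classes : List String) : String :=
  if boxes.isEmpty then "No objects detected in the image"
  else
    let names := class_ids.map (fun cid => PySem.List.pyGetD classes cid "")   -- classes[cid]; total form, exact under Pre_
    "Image contains " ++ PySem.Str.join ", " (pvPartsB names)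

-- ===== PRECONDITION & SPEC =====
-- Pre_ excludes exactly the inputs where classes[class_id] raises IndexError in A (B raises there too); with empty boxes both return early without indexing.
def Pre_generate_simple_caption (boxes : List (List Int)) (confs : List Int) (class_ids : List Int) (classes : List String) : Prop :=
  boxes = [] ∨ ∀ cid ∈ class_ids, PySem.Raise.InRange classes.length cid
instance (boxes : List (List Int)) (confs : List Int) (class_ids : List Int) (classes : List String) : Decidable (Pre_generate_simple_caption boxes confs class_ids classes) := by unfold Pre_generate_simple_caption; infer_instance
def pvWitness_generate_simple_caption : List (List Int) × List Int × List Int × List String := ([[0, 1, 2, 3]], [90], [0, 1, 0], ["cat", "dog"])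

def Spec_generate_simple_caption (boxes : List (List Int)) (confs : List Int) (class_ids : List Int) (classes : List String) (out : String) : Prop := out = generate_simple_caption_alt boxes confs class_ids classes
instance (boxes : List (List Int)) (confs : List Int) (class_ids : List Int) (classes : List String) (out : String) : Decidable (Spec_generate_simple_caption boxes confs class_ids classes out) := by unfold Spec_generate_simple_caption; infer_instance

-- ===== CLAIM (what is proved, stated in full; the proofs are below) =====
def Claim_equal_generate_simple_caption : Prop := ∀ (boxes : List (List Int)) (confs : List Int) (class_ids : List Int) (classes : List String), Dom_generate_simple_caption boxes confs class_ids classes → Pre_generate_simple_caption boxes confs class_ids classes → Spec_generate_simple_caption boxes confs class_ids classes (generate_simple_caption boxes confs class_ids classes)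

-- ===== LEMMAS AND PROOFS =====

-- 'acc.append(g x)' loop = acc ++ map g
theorem pv_foldl_append_map {α β : Type} (g : α → β) (l : List α) (acc : List β) :
    l.foldl (fun a x => a ++ [g x]) acc = acc ++ l.map g := by
  induction l generalizing acc with
  | nil => simp
  | cons x xs ih => simp [List.foldl_cons, ih]

-- ordered dedup commutes with removing all occurrences of an element
theorem pv_ofList_filter_ne (h : String) (t : List String) :
    PySem.Set.ofList (t.filter (fun n => n ≠ h)) = PySem.Set.discard (PySem.Set.ofList t) h := by
  induction t with
  | nil => rfl
  | cons x xs ih =>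
    by_cases hx : x = h
    · subst hx
      have hstep : (x :: xs).filter (fun n => n ≠ x) = xs.filter (fun n => n ≠ x) := by simp
      rw [hstep, ih, PySem.Set.ofList_cons]
      simp [PySem.Set.discard, List.filter_filter]
    · have hstep : (x :: xs).filter (fun n => n ≠ h) = x :: xs.filter (fun n => n ≠ h) := by
        simp [hx]
      rw [hstep, PySem.Set.ofList_cons, PySem.Set.ofList_cons, ih]
      simp only [PySem.Set.discard, List.filter_cons, List.filter_filter]
      have hxh : (x == h) = false := by simp [hx]
      simp only [hxh, Bool.not_false, if_true]
      congr 1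
      apply List.filter_congr
      intro a _
      rw [Bool.and_comm]

-- removing every occurrence of h from t drops exactly count h t elements
theorem pv_count_add_filter_length (h : String) (t : List String) :
    t.count h + (t.filter (fun n => n ≠ h)).length = t.length := by
  induction t with
  | nil => rfl
  | cons a t iht =>
    simp only [ne_eq, decide_not] at iht ⊢
    by_cases hah : a = h
    · subst hah
      simp only [List.count_cons_self, List.filter_cons, decide_true, Bool.not_true,
        Bool.false_eq_true, if_false, List.length_cons]
      omega
    · simp [hah]
      omega

theorem pvPartsB_eq_aux (n : Nat) : ∀ (names : List String), names.length ≤ n →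
    pvPartsB names = (PySem.Set.ofList names).map
      (fun k => if (names.count k : Int) = 1 then "a " ++ k
                else PySem.Int.toStr (names.count k) ++ " " ++ k ++ "s") := by
  induction n with
  | zero =>
    intro names hlen
    have : names = [] := List.eq_nil_of_length_eq_zero (Nat.le_zero.mp hlen)
    subst this
    simp [pvPartsB]
  | succ n ih =>
    intro names hlen
    match names with
    | [] => simp [pvPartsB]
    | h :: t =>
      rw [pvPartsB]
      simp only [List.cons_ne_nil, dite_false, List.head_cons, List.tail_cons, List.length_cons,
        PySem.Set.ofList_cons, List.map_cons, ne_eq, decide_not]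
      have hlenf := pv_count_add_filter_length h t
      simp only [ne_eq, decide_not] at hlenf
      rw [List.cons_eq_cons]
      refine ⟨?_, ?_⟩
      · have hc : ((t.length : Int) + 1) - ((t.filter (fun n => !decide (n = h))).length : Int)
            = (((h :: t).count h : Nat) : Int) := by
          simp only [List.count_cons_self]
          push_cast
          omega
        rw [Nat.cast_add, Nat.cast_one, hc]
      · have hrest : (t.filter (fun n => !decide (n = h))).length ≤ n := by
          have hf := List.length_filter_le (fun n => !decide (n = h)) t
          simp only [List.length_cons] at hlen
          omega
        refine (ih _ hrest).trans ?_
        have hset := pv_ofList_filter_ne h t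
        simp only [ne_eq, decide_not] at hset
        rw [hset]
        apply List.map_congr_left
        intro k hk
        have hkne : k ≠ h := ((PySem.Set.mem_discard _ _ _).1 hk).2
        have hcnt : (t.filter (fun n => !decide (n = h))).count k = (h :: t).count k := by
          rw [List.count_filter (by simp [hkne])]
          simp [Ne.symm hkne]
        rw [hcnt]

theorem pvPartsB_eq (names : List String) :
    pvPartsB names = (PySem.Set.ofList names).map
      (fun k => if (names.count k : Int) = 1 then "a " ++ k
                else PySem.Int.toStr (names.count k) ++ " " ++ k ++ "s") :=
  pvPartsB_eq_aux names.length names le_rfl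

theorem generate_simple_caption_spec : Claim_equal_generate_simple_caption := by
  intro boxes confs class_ids classes _ _
  unfold Spec_generate_simple_caption generate_simple_caption generate_simple_caption_alt
  by_cases h : boxes.isEmpty
  · simp [h]
  · simp only [h, Bool.false_eq_true, if_false]
    have hfold :
        class_ids.foldl (fun d class_id =>
            let obj_name := PySem.List.pyGetD classes class_id ""
            d.insert obj_name (d.getD obj_name 0 + 1)) PySem.Dict.empty
          = PySem.Dict.counter (class_ids.map (fun cid => PySem.List.pyGetD classes cid "")) := by
      rw [← PySem.Dict.foldl_insert_getD_add_one_eq_counter, List.foldl_map]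
    rw [hfold, pv_foldl_append_map, PySem.Dict.items_counter, pvPartsB_eq]
    simp [List.map_map, Function.comp_def, Nat.cast_eq_one]
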